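-- pv_equiv track=rewrite | github.com/mike2vandy/sternlab_tools | vcf2csv_cyyvcf.withGeno.py | reduceCSQ
-- ===== SOURCE A (Python) =====
-- def reduceCSQ(csqs, csq_indices):
--   if isinstance(csqs, str):
--     csqs = csqs.split(',')
--
--   updated = []
--   for conseq in csqs:
--     record = conseq.split('|')
--     new_record = []
--     for i in record:
--       if '&' in i:
--         new_record.append(i.split('&')[0])
--       else:
--         new_record.append(i)
--     result = ','.join([new_record[i] for i in csq_indices])
--     updated.append(result)
--
--   return updated
-- ===== SOURCE B (Python) =====
-- def reduceCSQ(csqs, csq_indices):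
--   if isinstance(csqs, str):
--     csqs = csqs.split(',')
--
--   def pick(conseq):
--     record = conseq.split('|')
--     return ','.join(record[i].split('&')[0] for i in csq_indices)
--
--   return [pick(conseq) for conseq in csqs]
-- ===== Notes on version B (the rewrite author's own statement) =====
-- stated objective: simpler
-- what changed: B drops A's full-record stripping pass and its maintained new_record list: it splits each CSQ once and builds the result directly by iterating over csq_indices, taking split('&')[0] of just the selected fields (no '&' membership branch).
import Mathlib
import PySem

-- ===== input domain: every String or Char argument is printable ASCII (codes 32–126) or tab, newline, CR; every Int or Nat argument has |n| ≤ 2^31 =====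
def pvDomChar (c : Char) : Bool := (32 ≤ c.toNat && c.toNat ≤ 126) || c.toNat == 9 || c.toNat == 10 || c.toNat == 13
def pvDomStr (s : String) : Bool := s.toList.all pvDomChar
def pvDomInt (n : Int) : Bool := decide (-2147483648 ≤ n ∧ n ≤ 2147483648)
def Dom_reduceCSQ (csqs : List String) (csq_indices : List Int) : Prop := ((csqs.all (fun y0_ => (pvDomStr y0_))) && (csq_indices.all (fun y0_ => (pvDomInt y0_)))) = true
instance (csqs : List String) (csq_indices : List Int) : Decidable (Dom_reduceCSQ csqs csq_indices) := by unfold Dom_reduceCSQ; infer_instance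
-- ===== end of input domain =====

-- B drops A's full-record stripping pass: it indexes each split record directly by
-- csq_indices and strips the '&'-suffix of only the selected fields (objective: simpler).

-- ===== PORT A =====
-- (the 'isinstance(csqs, str)' branch is unreachable under the List String signature;
--  "|" and "&" are nonempty, so split? is always some and .getD [] is exact)
def reduceCSQ (csqs : List String) (csq_indices : List Int) : List String :=
  csqs.foldl (fun updated conseq =>
    let record := (PySem.Str.split? conseq "|").getD []
    let new_record := record.foldl (fun nr i =>
      if PySem.Str.isIn "&" i then
        nr ++ [PySem.List.pyGetD ((PySem.Str.split? i "&").getD []) 0 ""]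
      else
        nr ++ [i]) []
    let result := PySem.Str.join "," (csq_indices.map (fun i => PySem.List.pyGetD new_record i ""))
    updated ++ [result]) []

-- ===== PORT B =====
def reduceCSQ_alt (csqs : List String) (csq_indices : List Int) : List String :=
  csqs.map (fun conseq =>
    let record := (PySem.Str.split? conseq "|").getD []
    PySem.Str.join "," (csq_indices.map (fun i =>
      PySem.List.pyGetD ((PySem.Str.split? (PySem.List.pyGetD record i "") "&").getD []) 0 "")))

-- ===== PRECONDITION & SPEC =====
-- Pre_ excludes exactly the inputs where Python A raises IndexError: some index in
-- csq_indices out of range (Python negative-index rules) for some record's field list.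
def Pre_reduceCSQ (csqs : List String) (csq_indices : List Int) : Prop :=
  ∀ s ∈ csqs, ∀ i ∈ csq_indices,
    PySem.Raise.InRange ((PySem.Str.split? s "|").getD []).length i
instance (csqs : List String) (csq_indices : List Int) : Decidable (Pre_reduceCSQ csqs csq_indices) := by unfold Pre_reduceCSQ; infer_instance

def pvWitness_reduceCSQ : List String × List Int := (["a&b|c", "x|y&z|w"], [0, -1])

def Spec_reduceCSQ (csqs : List String) (csq_indices : List Int) (out : List String) : Prop := out = reduceCSQ_alt csqs csq_indices
instance (csqs : List String) (csq_indices : List Int) (out : List String) : Decidable (Spec_reduceCSQ csqs csq_indices out) := by unfold Spec_reduceCSQ; infer_instance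

-- ===== CLAIM (what is proved, stated in full; the proofs are below) =====
def Claim_equal_reduceCSQ : Prop := ∀ (csqs : List String) (csq_indices : List Int), Dom_reduceCSQ csqs csq_indices → Pre_reduceCSQ csqs csq_indices → Spec_reduceCSQ csqs csq_indices (reduceCSQ csqs csq_indices)

-- ===== LEMMAS AND PROOFS =====

-- splitOn.go on a string not containing the separator yields one piece
theorem splitOn_go_no_sep (sep : List Char) (fuel : Nat) :
    ∀ (l cur : List Char) (hacc : List (List Char)),
      ¬ sep <:+: l →
      PySem.Chars.splitOn.go sep fuel l cur hacc = hacc.reverse ++ [cur.reverse ++ l] := by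
  induction fuel with
  | zero =>
    intro l cur hacc _
    simp [PySem.Chars.splitOn.go]
  | succ fuel ih =>
    intro l cur hacc h
    match l with
    | [] => simp [PySem.Chars.splitOn.go]
    | c :: rest =>
      rw [PySem.Chars.splitOn.go]
      have hp : sep.isPrefixOf (c :: rest) = false := by
        rw [Bool.eq_false_iff]
        intro hb
        exact h (List.isPrefixOf_iff_prefix.mp hb).isInfix
      simp only [hp, Bool.false_eq_true, if_false]
      have h' : ¬ sep <:+: rest := fun hi => h (hi.trans (List.suffix_cons c rest).isInfix)
      rw [ih rest (c :: cur) hacc h']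
      simp

theorem splitOn_no_sep (s sep : List Char) (h : ¬ sep <:+: s) :
    PySem.Chars.splitOn s sep = [s] := by
  rw [PySem.Chars.splitOn, splitOn_go_no_sep sep _ s [] [] h]
  simp

-- B's per-field operation: split('&')[0]
def stripB (s : String) : String :=
  PySem.List.pyGetD ((PySem.Str.split? s "&").getD []) 0 ""

-- the '&' branch of A is redundant: split('&')[0] of a '&'-free string is the string itself
theorem strip_eq (s : String) :
    (if PySem.Str.isIn "&" s then
        PySem.List.pyGetD ((PySem.Str.split? s "&").getD []) 0 ""
      else s) = stripB s := by
  by_cases h : PySem.Str.isIn "&" s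
  · simp only [h, if_true, stripB]
  · simp only [h, Bool.false_eq_true, if_false, stripB]
    have hni : ¬ ("&" : String).toList <:+: s.toList := by
      rw [← PySem.Chars.isIn_eq_false_iff]
      simpa [PySem.Str.isIn] using h
    rw [PySem.Str.split?]
    simp only [PySem.Chars.split?, List.isEmpty_iff]
    rw [splitOn_no_sep _ _ hni]
    simp

theorem strip_empty : stripB "" = "" := by decide

-- A's inner stripping loop builds exactly the stripped copy of the record
theorem newrec_eq (record : List String) :
    record.foldl (fun nr i =>
      if PySem.Str.isIn "&" i then
        nr ++ [PySem.List.pyGetD ((PySem.Str.split? i "&").getD []) 0 ""]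
      else nr ++ [i]) []
    = record.map stripB := by
  have hfun : (fun (nr : List String) i =>
      if PySem.Str.isIn "&" i then
        nr ++ [PySem.List.pyGetD ((PySem.Str.split? i "&").getD []) 0 ""]
      else nr ++ [i]) = fun nr i => nr ++ [stripB i] := by
    funext nr i
    have hsplit : (if PySem.Str.isIn "&" i then
        nr ++ [PySem.List.pyGetD ((PySem.Str.split? i "&").getD []) 0 ""]
      else nr ++ [i]) = nr ++ [if PySem.Str.isIn "&" i then
        PySem.List.pyGetD ((PySem.Str.split? i "&").getD []) 0 "" else i] := by
      split <;> rfl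
    rw [hsplit, strip_eq]
  rw [hfun, PySem.List.foldl_append_singleton_eq_map]
  simp

-- indexing the stripped record = stripping the indexed field (defaults agree: stripB "" = "")
theorem select_eq (record : List String) (i : Int) :
    PySem.List.pyGetD (record.map stripB) i "" = stripB (PySem.List.pyGetD record i "") := by
  rw [show ("" : String) = stripB "" from strip_empty.symm]
  exact PySem.List.pyGetD_map stripB record i (stripB "")

-- one CSQ string: A's joined selection over the stripped record = B's direct selection
theorem elem_eq (csq_indices : List Int) (conseq : String) :
    PySem.Str.join "," (csq_indices.map (fun i =>
      PySem.List.pyGetD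
        (((PySem.Str.split? conseq "|").getD []).foldl (fun nr j =>
          if PySem.Str.isIn "&" j then
            nr ++ [PySem.List.pyGetD ((PySem.Str.split? j "&").getD []) 0 ""]
          else nr ++ [j]) []) i ""))
    = PySem.Str.join "," (csq_indices.map (fun i =>
        PySem.List.pyGetD ((PySem.Str.split? (PySem.List.pyGetD ((PySem.Str.split? conseq "|").getD []) i "") "&").getD []) 0 "")) := by
  rw [newrec_eq]
  congr 1
  apply List.map_congr_left
  intro i _
  rw [select_eq]
  rfl

theorem foldl_aux (csq_indices : List Int) (csqs : List String) (acc : List String) :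
    csqs.foldl (fun updated conseq =>
      let record := (PySem.Str.split? conseq "|").getD []
      let new_record := record.foldl (fun nr i =>
        if PySem.Str.isIn "&" i then
          nr ++ [PySem.List.pyGetD ((PySem.Str.split? i "&").getD []) 0 ""]
        else
          nr ++ [i]) []
      let result := PySem.Str.join "," (csq_indices.map (fun i => PySem.List.pyGetD new_record i ""))
      updated ++ [result]) acc
    = acc ++ csqs.map (fun conseq =>
        let record := (PySem.Str.split? conseq "|").getD []
        PySem.Str.join "," (csq_indices.map (fun i =>
          PySem.List.pyGetD ((PySem.Str.split? (PySem.List.pyGetD record i "") "&").getD []) 0 ""))) := by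
  induction csqs generalizing acc with
  | nil => simp
  | cons c cs ih =>
    simp only [List.foldl_cons, List.map_cons]
    rw [ih]
    simp only [elem_eq]
    simp

-- ===== VERDICT (by name: the statement is the Claim_ definition above) =====
theorem reduceCSQ_spec : Claim_equal_reduceCSQ := by
  intro csqs csq_indices _ _
  unfold Spec_reduceCSQ reduceCSQ reduceCSQ_alt
  rw [foldl_aux]
  simp
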